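-- pv_equiv track=rewrite | github.com/shivam15112003/text_analysis | text_analysis.py | dir
-- ===== SOURCE A (Python) =====
-- def dir(text,positive_words,negative_words):
--     fdir={}
--     for words in text:
--         if words in positive_words:
--             fdir['positive']=words
--         if words in negative_words:
--             fdir['negative']=words
--     return fdir
-- ===== SOURCE B (Python) =====
-- def dir(text, positive_words, negative_words):
--     pos, neg = set(positive_words), set(negative_words)
--     res = {}
--     p = next((w for w in reversed(text) if w in pos), None)
--     if p is not None:
--         res['positive'] = p
--     n = next((w for w in reversed(text) if w in neg), None)
--     if n is not None:
--         res['negative'] = n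
--     return res
-- ===== Notes on version B (the rewrite author's own statement) =====
-- stated objective: faster
-- what changed: A makes one forward pass testing each word against both lists and overwriting dict entries; B instead builds sets once and does two reverse searches that stop at the last positive/negative word; Pre_ excludes inputs where A's accidental dict key insertion order puts 'negative' before 'positive' (first sentiment-bearing word is negative-only while a positive word also occurs), where both dicts hold the same mapping in different key order.
import Mathlib
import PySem

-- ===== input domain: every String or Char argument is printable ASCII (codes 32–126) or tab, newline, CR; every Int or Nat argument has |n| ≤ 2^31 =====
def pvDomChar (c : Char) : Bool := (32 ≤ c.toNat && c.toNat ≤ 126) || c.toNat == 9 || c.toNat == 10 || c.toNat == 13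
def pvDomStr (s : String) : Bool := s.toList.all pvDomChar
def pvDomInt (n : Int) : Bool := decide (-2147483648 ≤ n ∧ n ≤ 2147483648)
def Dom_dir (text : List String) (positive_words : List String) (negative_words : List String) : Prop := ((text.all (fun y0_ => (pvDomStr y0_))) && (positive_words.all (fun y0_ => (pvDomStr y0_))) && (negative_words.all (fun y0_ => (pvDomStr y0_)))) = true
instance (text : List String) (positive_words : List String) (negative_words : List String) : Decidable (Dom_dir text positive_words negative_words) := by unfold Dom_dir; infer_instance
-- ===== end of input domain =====

-- B replaces A's full forward pass (list-membership tests, dict overwrites) by two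
-- reverse searches against prebuilt sets that stop at the last positive/negative word
-- (objective: faster); the RETURN dict's mapping is identical, and Pre_ excludes the
-- inputs where only A's accidental key insertion order differs.

-- ===== PORT A =====
-- loop body of A's 'for words in text' (two 'in list' tests, two dict writes)
def pvStep (positive_words negative_words : List String) (fdir : PySem.Dict String String) (words : String) : PySem.Dict String String :=
  let fdir := if positive_words.contains words then fdir.insert "positive" words else fdir
  if negative_words.contains words then fdir.insert "negative" words else fdir

def dir (text : List String) (positive_words : List String) (negative_words : List String) : List (String × String) :=
  (text.foldl (pvStep positive_words negative_words) PySem.Dict.empty).items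

-- ===== PORT B =====
-- Source B: res starts empty, so each 'res[k] = v' on a fresh key is an append of (k, v).
def dir_alt (text : List String) (positive_words : List String) (negative_words : List String) : List (String × String) :=
  let pos : PySem.Set String := PySem.Set.ofList positive_words
  let neg : PySem.Set String := PySem.Set.ofList negative_words
  let p := text.reverse.find? (fun w => pos.contains w)
  let res := match p with | some v => [("positive", v)] | none => []
  let n := text.reverse.find? (fun w => neg.contains w)
  match n with | some v => res ++ [("negative", v)] | none => res

-- ===== PRECONDITION & SPEC =====
-- Pre_ excludes inputs on which A still returns: those where the first sentiment-bearing
-- word of text is negative-only while a positive word also occurs, so that A's dict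
-- accidentally lists 'negative' before 'positive' — both key orders carry the same
-- mapping and either is defensible, so these accidental-order inputs are carved out.
def Pre_dir (text : List String) (positive_words : List String) (negative_words : List String) : Prop :=
  (((text.find? (fun w => positive_words.contains w || negative_words.contains w)).any
      (fun f => negative_words.contains f && !positive_words.contains f))
    && text.any (fun w => positive_words.contains w)) = false
instance (text : List String) (positive_words : List String) (negative_words : List String) : Decidable (Pre_dir text positive_words negative_words) := by unfold Pre_dir; infer_instance

def pvWitness_dir : List String × List String × List String := (["good", "bad"], ["good"], ["bad"])

def Spec_dir (text : List String) (positive_words : List String) (negative_words : List String) (out : List (String × String)) : Prop := out = dir_alt text positive_words negative_words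
instance (text : List String) (positive_words : List String) (negative_words : List String) (out : List (String × String)) : Decidable (Spec_dir text positive_words negative_words out) := by unfold Spec_dir; infer_instance

-- ===== CLAIM (what is proved, stated in full; the proofs are below) =====
def Claim_equal_dir : Prop := ∀ (text : List String) (positive_words : List String) (negative_words : List String), Dom_dir text positive_words negative_words → Pre_dir text positive_words negative_words → Spec_dir text positive_words negative_words (dir text positive_words negative_words)

-- ===== LEMMAS AND PROOFS =====

theorem pv_set_contains_eq (xs : List String) (w : String) :
    PySem.Set.contains (PySem.Set.ofList xs) w = xs.contains w := by
  rw [Bool.eq_iff_iff]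
  simp [PySem.Set.mem_ofList]

-- proof helper: A's fold result written as a function of the last positive word, the
-- last negative word and whether the first sentiment-bearing word is negative-only
def pvMix (text : List String) (positive_words : List String) (negative_words : List String) : List (String × String) :=
  let p := text.reverse.find? (fun w => positive_words.contains w)
  let n := text.reverse.find? (fun w => negative_words.contains w)
  let first := text.find? (fun w => positive_words.contains w || negative_words.contains w)
  let negFirst := match first with
    | some f => negative_words.contains f && !(positive_words.contains f)
    | none => false
  if negFirst then
    (match n with | some v => [("negative", v)] | none => []) ++
    (match p with | some v => [("positive", v)] | none => [])
  else
    (match p with | some v => [("positive", v)] | none => []) ++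
    (match n with | some v => [("negative", v)] | none => [])

-- step lemma: A's loop body applied to the characterisation for l gives it for l ++ [w]
theorem pv_step_lemma (pw nw : List String) (l : List String) (w : String) :
    pvStep pw nw ⟨pvMix l pw nw⟩ w = ⟨pvMix (l ++ [w]) pw nw⟩ := by
  simp only [pvMix, pvStep, List.reverse_append, List.reverse_cons,
    List.reverse_nil, List.nil_append, List.cons_append, List.find?_cons, List.find?_append,
    List.find?_nil]
  by_cases hPw : pw.contains w = true <;> by_cases hNw : nw.contains w = true <;>
    cases hp : l.reverse.find? (fun x => pw.contains x) <;>
    cases hn : l.reverse.find? (fun x => nw.contains x) <;>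
    cases hf : l.find? (fun x => pw.contains x || nw.contains x) <;>
    simp_all [PySem.Dict.insert, Option.or] <;>
  · try have hfm := List.mem_of_find?_eq_some hf
    try have hfs := List.find?_some hf
    try have hnm := List.mem_of_find?_eq_some hn
    try have hns := List.find?_some hn
    try have hpm := List.mem_of_find?_eq_some hp
    try have hps := List.find?_some hp
    try simp_all
    try (split_ifs <;> simp_all)
    try tauto

-- main invariant: the fold's dict has exactly the characterisation's items
theorem pv_main (positive_words negative_words : List String) (text : List String) :
    text.foldl (pvStep positive_words negative_words) PySem.Dict.empty
      = ⟨pvMix text positive_words negative_words⟩ := by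
  induction text using List.reverseRecOn with
  | nil => rfl
  | append_singleton l w ih =>
      rw [List.foldl_append, List.foldl_cons, List.foldl_nil, ih, pv_step_lemma]

-- under Pre_ the characterisation coincides with B's port
theorem pv_mix_eq_alt (text pw nw : List String) (h : Pre_dir text pw nw) :
    pvMix text pw nw = dir_alt text pw nw := by
  unfold Pre_dir at h
  unfold pvMix dir_alt
  simp only [pv_set_contains_eq]
  cases hf : text.find? (fun w => pw.contains w || nw.contains w) with
  | none =>
    cases hn : text.reverse.find? (fun w => nw.contains w) <;>
      cases hp : text.reverse.find? (fun w => pw.contains w) <;> simp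
  | some f =>
    rw [hf] at h
    simp only [Option.any_some] at h
    by_cases hneg : (nw.contains f && !pw.contains f) = true
    · have hanyf := h
      rw [hneg, Bool.true_and] at hanyf
      have hpn : text.reverse.find? (fun w => pw.contains w) = none := by
        rw [List.find?_eq_none]
        intro x hx
        simpa using List.any_eq_false.mp hanyf x (List.mem_reverse.mp hx)
      simp only [hneg, hpn, if_true]
      cases hn : text.reverse.find? (fun w => nw.contains w) <;> simp
    · simp only [Bool.not_eq_true] at hneg
      simp only [hneg]
      cases hn : text.reverse.find? (fun w => nw.contains w) <;>
        cases hp : text.reverse.find? (fun w => pw.contains w) <;> simp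

-- ===== VERDICT (by name: the statement is the Claim_ definition above) =====
theorem dir_spec : Claim_equal_dir := by
  intro text pw nw _ hpre
  unfold Spec_dir dir
  rw [pv_main, pv_mix_eq_alt _ _ _ hpre]
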